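-- pv_equiv track=rewrite | github.com/kimgyuhee/Python | Chapter0_Algorithm/2304/230403/test04.py | solution
-- ===== SOURCE A (Python) =====
-- from math import prod
--
-- def solution(arr):
--     answer = 0
--     decimal = [2, 3, 5, 7]
--     for d in decimal :
--         result = list(map(lambda x : x%d, arr))
--         if sum(result) == 0 :
--             answer = d
--             value = list(map(lambda x : x//d, arr))
--             break
--
--     if answer !=0 :
--         return prod(value) * answer
--     else :
--         return prod(arr)
-- ===== SOURCE B (Python) =====
-- from math import prod, gcd
--
-- def solution(arr):
--     g = 0
--     for x in arr:
--         g = gcd(g, x)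
--     for d in (2, 3, 5, 7):
--         if g % d == 0:
--             return prod(x // d for x in arr) * d
--     return prod(arr)
-- ===== Notes on version B (the rewrite author's own statement) =====
-- stated objective: alternative
-- what changed: Replaces A's per-prime full-array divisibility scans (a mod-map and sum for each of 2,3,5,7) with one gcd aggregate over the array followed by four constant-time divisibility checks on the gcd.
import Mathlib
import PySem

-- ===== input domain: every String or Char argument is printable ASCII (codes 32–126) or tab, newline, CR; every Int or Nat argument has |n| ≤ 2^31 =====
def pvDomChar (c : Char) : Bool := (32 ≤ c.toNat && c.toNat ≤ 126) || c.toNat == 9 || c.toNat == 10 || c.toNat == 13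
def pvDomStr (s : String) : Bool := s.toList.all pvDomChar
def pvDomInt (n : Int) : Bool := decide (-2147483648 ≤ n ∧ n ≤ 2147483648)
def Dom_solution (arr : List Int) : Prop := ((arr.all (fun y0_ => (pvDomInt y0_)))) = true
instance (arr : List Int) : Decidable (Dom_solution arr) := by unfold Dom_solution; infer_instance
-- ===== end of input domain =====

-- B replaces A's four per-prime whole-array divisibility scans with one gcd pass
-- plus four constant-time checks on the gcd (objective: alternative; same measured cost,
-- dominated by the final product).

-- ===== PORT A =====
-- the for-loop with break: first d in decimal whose mod-sum is 0, together with value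
def solutionLoop (arr : List Int) : List Int → Option (Int × List Int)
  | [] => none
  | d :: ds =>
    if (arr.map (fun x => PySem.Int.mod x d)).sum = 0 then
      some (d, arr.map (fun x => PySem.Int.floordiv x d))
    else solutionLoop arr ds

def solution (arr : List Int) : Int :=
  match solutionLoop arr [2, 3, 5, 7] with
  | some (answer, value) => value.prod * answer
  | none => arr.prod

-- ===== PORT B =====
def solution_alt (arr : List Int) : Int :=
  let g : Int := arr.foldl (fun a x => (Int.gcd a x : Int)) 0
  match [2, 3, 5, 7].find? (fun d => PySem.Int.mod g d == 0) with
  | some d => (arr.map (fun x => PySem.Int.floordiv x d)).prod * d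
  | none => arr.prod

-- ===== PRECONDITION & SPEC =====
def Spec_solution (arr : List Int) (out : Int) : Prop := out = solution_alt arr
instance (arr : List Int) (out : Int) : Decidable (Spec_solution arr out) := by unfold Spec_solution; infer_instance

-- ===== CLAIM (what is proved, stated in full; the proofs are below) =====
def Claim_equal_solution : Prop := ∀ (arr : List Int), Dom_solution arr → Spec_solution arr (solution arr)

-- ===== LEMMAS AND PROOFS =====

theorem sum_mod_eq_zero_iff (arr : List Int) (d : Int) (hd : 0 < d) :
    (arr.map (fun x => x % d)).sum = 0 ↔ ∀ x ∈ arr, d ∣ x := by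
  induction arr with
  | nil => simp
  | cons y t ih =>
    have h1 : 0 ≤ y % d := Int.emod_nonneg y (by omega)
    have h2 : 0 ≤ (t.map (fun x => x % d)).sum := by
      apply List.sum_nonneg
      intro z hz
      obtain ⟨x, _, rfl⟩ := List.mem_map.mp hz
      exact Int.emod_nonneg x (by omega)
    simp only [List.map_cons, List.sum_cons, List.mem_cons]
    constructor
    · intro h
      have ha : y % d = 0 := by omega
      have ht : (t.map (fun x => x % d)).sum = 0 := by omega
      intro x hx
      rcases hx with rfl | hx
      · exact Int.dvd_of_emod_eq_zero ha
      · exact (ih.mp ht) x hx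
    · intro h
      have ha : y % d = 0 := Int.emod_eq_zero_of_dvd (h y (Or.inl rfl))
      have ht : (t.map (fun x => x % d)).sum = 0 :=
        ih.mpr (fun x hx => h x (Or.inr hx))
      omega

theorem dvd_foldl_gcd (arr : List Int) (d : Int) (g : Int) :
    d ∣ (arr.foldl (fun a x => (Int.gcd a x : Int)) g) ↔ (d ∣ g ∧ ∀ x ∈ arr, d ∣ x) := by
  induction arr generalizing g with
  | nil => simp
  | cons y t ih =>
    simp only [List.foldl_cons, ih, Int.dvd_coe_gcd_iff, List.mem_cons]
    constructor
    · rintro ⟨⟨hg, hy⟩, ht⟩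
      exact ⟨hg, fun x hx => hx.elim (fun h => h ▸ hy) (ht x)⟩
    · rintro ⟨hg, h⟩
      exact ⟨⟨hg, h y (Or.inl rfl)⟩, fun x hx => h x (Or.inr hx)⟩

theorem cond_equiv (arr : List Int) (d : Int) (hd : 0 < d) :
    (arr.map (fun x => x % d)).sum = 0 ↔
      (arr.foldl (fun a x => (Int.gcd a x : Int)) 0) % d = 0 := by
  rw [sum_mod_eq_zero_iff arr d hd]
  constructor
  · intro h
    exact Int.emod_eq_zero_of_dvd ((dvd_foldl_gcd arr d 0).mpr ⟨dvd_zero d, h⟩)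
  · intro h
    exact ((dvd_foldl_gcd arr d 0).mp (Int.dvd_of_emod_eq_zero h)).2

-- ===== VERDICT (by name: the statement is the Claim_ definition above) =====
theorem solution_spec : Claim_equal_solution := by
  intro arr _
  unfold Spec_solution solution solution_alt
  simp only [solutionLoop, List.find?]
  have e2 := cond_equiv arr 2 (by norm_num)
  have e3 := cond_equiv arr 3 (by norm_num)
  have e5 := cond_equiv arr 5 (by norm_num)
  have e7 := cond_equiv arr 7 (by norm_num)
  by_cases h2 : (arr.map (fun x => x % 2)).sum = 0
  · simp [h2, e2.mp h2]
  · have m2 : ((arr.foldl (fun a x => (Int.gcd a x : Int)) 0) % 2 == 0) = false :=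
      beq_eq_false_iff_ne.mpr (fun h => h2 (e2.mpr h))
    by_cases h3 : (arr.map (fun x => x % 3)).sum = 0
    · simp [h2, h3, m2, e3.mp h3]
    · have m3 : ((arr.foldl (fun a x => (Int.gcd a x : Int)) 0) % 3 == 0) = false :=
        beq_eq_false_iff_ne.mpr (fun h => h3 (e3.mpr h))
      by_cases h5 : (arr.map (fun x => x % 5)).sum = 0
      · simp [h2, h3, h5, m2, m3, e5.mp h5]
      · have m5 : ((arr.foldl (fun a x => (Int.gcd a x : Int)) 0) % 5 == 0) = false :=
          beq_eq_false_iff_ne.mpr (fun h => h5 (e5.mpr h))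
        by_cases h7 : (arr.map (fun x => x % 7)).sum = 0
        · simp [h2, h3, h5, h7, m2, m3, m5, e7.mp h7]
        · have m7 : ((arr.foldl (fun a x => (Int.gcd a x : Int)) 0) % 7 == 0) = false :=
            beq_eq_false_iff_ne.mpr (fun h => h7 (e7.mpr h))
          simp [h2, h3, h5, h7, m2, m3, m5, m7]
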